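-- pv_equiv track=rewrite | github.com/JiangteCao/Topic-Modelling-and-Clustering-for-Low-Resource-Parallel-Corpus | src/classification/topic_labeling.py | initial_rule_based_labeling
-- ===== SOURCE A (Python) =====
-- from typing import Dict, List
--
-- TOPIC_KEYWORDS: Dict[str, set] = {
--     "development": {"neu", "projekt", "zukunft", "arbeit", "entwicklung", "ziel", "stadt"},
--     "local_identity": {"bautzen", "lausitz", "sorbisch", "oberlausitz", "freund", "bautzener"},
--     "org_politics": {"domowina", "mitglied", "sachsen", "verein", "bundesvorstand"},
--     "culture_language": {"sorbisch", "sprache", "kultur", "volk", "institut", "deutsch"},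
--     "religion_faith": {"gott", "herr", "jesus", "christus", "geist", "himmel"},
--     "education": {"kind", "schule", "schüler", "lehrer", "klasse", "eltern"},
--     "household_life": {
--         "kind", "kinder", "mensch", "haus", "wohnung", "familie", "mutter", "vater",
--         "mädchen", "junge", "baby", "essen", "trinken", "bett", "zimmer", "stuhl",
--         "fenster", "tisch", "milch", "wasser", "brot", "spiel", "leben", "frau", "mann"
--     },
--     "nature_environment": {"baum", "wind", "wasser", "luft", "erde", "regen", "wiese", "natur", "pflanze", "blume"}
-- }
--
-- def initial_rule_based_labeling(
--     sentences: List[str],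
--     topic_keywords: Dict[str, set] = TOPIC_KEYWORDS,
--     min_keywords: int = 2,
--     n_per_topic: int = 60
-- ) -> Dict[str, List[str]]:
--     """
--     Perform initial rule-based topic assignment based on keyword overlap.
--     Sentences not matched are stored in 'Others'.
--     """
--     topic_sentences = {topic: [] for topic in topic_keywords}
--     topic_sentences["Others"] = []
--
--     for sent in sentences:
--         words = set(sent.lower().split())
--         matched = False
--         for topic, keywords in topic_keywords.items():
--             if len(words & keywords) >= min_keywords:
--                 topic_sentences[topic].append(sent)
--                 matched = True
--         if not matched:
--             topic_sentences["Others"].append(sent)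
--
--     # keep only top-n per topic
--     for topic in topic_keywords:
--         topic_sentences[topic] = topic_sentences[topic][:n_per_topic]
--
--     return topic_sentences
-- ===== SOURCE B (Python) =====
-- from typing import Dict, List
--
-- TOPIC_KEYWORDS: Dict[str, set] = {
--     "development": {"neu", "projekt", "zukunft", "arbeit", "entwicklung", "ziel", "stadt"},
--     "local_identity": {"bautzen", "lausitz", "sorbisch", "oberlausitz", "freund", "bautzener"},
--     "org_politics": {"domowina", "mitglied", "sachsen", "verein", "bundesvorstand"},
--     "culture_language": {"sorbisch", "sprache", "kultur", "volk", "institut", "deutsch"},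
--     "religion_faith": {"gott", "herr", "jesus", "christus", "geist", "himmel"},
--     "education": {"kind", "schule", "schüler", "lehrer", "klasse", "eltern"},
--     "household_life": {
--         "kind", "kinder", "mensch", "haus", "wohnung", "familie", "mutter", "vater",
--         "mädchen", "junge", "baby", "essen", "trinken", "bett", "zimmer", "stuhl",
--         "fenster", "tisch", "milch", "wasser", "brot", "spiel", "leben", "frau", "mann"
--     },
--     "nature_environment": {"baum", "wind", "wasser", "luft", "erde", "regen", "wiese", "natur", "pflanze", "blume"}
-- }
--
-- def initial_rule_based_labeling(
--     sentences: List[str],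
--     topic_keywords: Dict[str, set] = TOPIC_KEYWORDS,
--     min_keywords: int = 2,
--     n_per_topic: int = 60
-- ) -> Dict[str, List[str]]:
--     """Topic-major re-implementation: precompute each sentence's word set once,
--     then build each topic's list as one filtered pass over the sentences,
--     truncated; 'Others' is the sentences matching no topic."""
--     tagged = [(s, set(s.lower().split())) for s in sentences]
--     result = {
--         topic: [s for s, ws in tagged if len(ws & kws) >= min_keywords][:n_per_topic]
--         for topic, kws in topic_keywords.items()
--     }
--     result["Others"] = [s for s, ws in tagged
--                         if all(len(ws & kws) < min_keywords for kws in topic_keywords.values())]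
--     return result
-- ===== Notes on version B (the rewrite author's own statement) =====
-- stated objective: simpler
-- what changed: A loops sentence-major over a mutable per-topic dict with a matched flag and truncates afterwards; B precomputes each sentence's word set once and builds the result topic-major as one filtered comprehension per topic plus a second filter for 'Others'.
-- outside the precondition, e.g. on initial_rule_based_labeling(['x'], {'Others': {'a'}}, 1, 0): A returns {'Others': []}, B returns {'Others': ['x']}
import Mathlib
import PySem

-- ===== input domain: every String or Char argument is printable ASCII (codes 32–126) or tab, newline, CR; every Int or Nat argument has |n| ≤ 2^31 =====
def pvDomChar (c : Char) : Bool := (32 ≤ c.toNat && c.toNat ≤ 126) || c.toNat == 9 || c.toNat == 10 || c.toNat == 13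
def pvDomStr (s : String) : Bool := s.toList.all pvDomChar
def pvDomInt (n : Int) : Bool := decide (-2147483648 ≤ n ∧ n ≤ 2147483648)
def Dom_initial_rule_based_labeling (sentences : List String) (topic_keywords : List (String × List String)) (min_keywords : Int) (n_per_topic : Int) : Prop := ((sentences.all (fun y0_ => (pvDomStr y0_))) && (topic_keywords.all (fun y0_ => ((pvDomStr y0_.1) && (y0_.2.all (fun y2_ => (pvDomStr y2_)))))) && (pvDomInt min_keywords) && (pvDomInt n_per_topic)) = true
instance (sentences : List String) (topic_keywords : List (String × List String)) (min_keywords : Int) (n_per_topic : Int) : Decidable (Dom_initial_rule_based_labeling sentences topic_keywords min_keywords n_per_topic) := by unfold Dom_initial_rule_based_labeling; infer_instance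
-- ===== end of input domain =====

-- B replaces A's sentence-major loop with mutable per-topic lists by a topic-major
-- build: each topic's list is one filtered pass over the sentences (word sets
-- precomputed once), 'Others' a second filter — same asymptotic cost, shorter and plainer.

-- ===== PORT A =====
-- The Python parameter is a dict; the association list is normalized to Python
-- dict semantics (first position, last value on duplicate keys) at entry.
def initial_rule_based_labeling (sentences : List String) (topic_keywords : List (String × List String)) (min_keywords : Int) (n_per_topic : Int) : List (String × List String) :=
  let tk := (PySem.Dict.ofList topic_keywords).items
  -- topic_sentences = {topic: [] for topic in topic_keywords}; topic_sentences["Others"] = []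
  let ts1 := (tk.foldl (fun (d : PySem.Dict String (List String)) p => d.insert p.1 []) PySem.Dict.empty).insert "Others" []
  -- for sent in sentences: …
  let ts2 := sentences.foldl (fun ts sent =>
    let words := PySem.Set.ofList (PySem.Str.split₀ (PySem.Str.lower sent))
    let r := tk.foldl (fun (acc : PySem.Dict String (List String) × Bool) p =>
      if min_keywords ≤ PySem.Set.len (PySem.Set.inter words (PySem.Set.ofList p.2)) then
        (acc.1.modify p.1 [] (fun l => l ++ [sent]), true)
      else acc) (ts, false)
    if r.2 then r.1 else r.1.modify "Others" [] (fun l => l ++ [sent])) ts1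
  -- for topic in topic_keywords: topic_sentences[topic] = topic_sentences[topic][:n_per_topic]
  (tk.foldl (fun (ts : PySem.Dict String (List String)) p =>
      ts.insert p.1 (PySem.List.slice (ts.getD p.1 []) none (some n_per_topic))) ts2).items

-- ===== PORT B =====
def initial_rule_based_labeling_alt (sentences : List String) (topic_keywords : List (String × List String)) (min_keywords : Int) (n_per_topic : Int) : List (String × List String) :=
  let tk := (PySem.Dict.ofList topic_keywords).items
  -- tagged = [(s, set(s.lower().split())) for s in sentences]
  let tagged := sentences.map (fun s => (s, PySem.Set.ofList (PySem.Str.split₀ (PySem.Str.lower s))))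
  -- result = {topic: [s for s, ws in tagged if len(ws & kws) >= min_keywords][:n_per_topic] …}
  let res := tk.foldl (fun (d : PySem.Dict String (List String)) p =>
    d.insert p.1 (PySem.List.slice ((tagged.filter (fun q =>
        decide (min_keywords ≤ PySem.Set.len (PySem.Set.inter q.2 (PySem.Set.ofList p.2))))).map Prod.fst) none (some n_per_topic))) PySem.Dict.empty
  -- result["Others"] = [s for s, ws in tagged if all(len(ws & kws) < min_keywords …)]
  (res.insert "Others" ((tagged.filter (fun q => tk.all (fun p =>
      decide (PySem.Set.len (PySem.Set.inter q.2 (PySem.Set.ofList p.2)) < min_keywords)))).map Prod.fst)).items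

-- ===== PRECONDITION & SPEC =====
-- Pre_ excludes a topic literally named "Others": there A's matched/unmatched
-- sentences share one list and are truncated together, an accidental artefact of
-- the dict-key collision, while B's "Others" assignment overwrites that topic.
def Pre_initial_rule_based_labeling (sentences : List String) (topic_keywords : List (String × List String)) (min_keywords : Int) (n_per_topic : Int) : Prop :=
  ∀ p ∈ topic_keywords, p.1 ≠ "Others"
instance (sentences : List String) (topic_keywords : List (String × List String)) (min_keywords : Int) (n_per_topic : Int) : Decidable (Pre_initial_rule_based_labeling sentences topic_keywords min_keywords n_per_topic) := by unfold Pre_initial_rule_based_labeling; infer_instance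
def pvWitness_initial_rule_based_labeling : List String × (List (String × List String)) × Int × Int :=
  (["Kind und schule", "gott"], [("education", ["kind", "schule"]), ("religion_faith", ["gott", "herr"])], 2, 60)
def Spec_initial_rule_based_labeling (sentences : List String) (topic_keywords : List (String × List String)) (min_keywords : Int) (n_per_topic : Int) (out : List (String × List String)) : Prop := out = initial_rule_based_labeling_alt sentences topic_keywords min_keywords n_per_topic
instance (sentences : List String) (topic_keywords : List (String × List String)) (min_keywords : Int) (n_per_topic : Int) (out : List (String × List String)) : Decidable (Spec_initial_rule_based_labeling sentences topic_keywords min_keywords n_per_topic out) := by unfold Spec_initial_rule_based_labeling; infer_instance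

-- ===== CLAIM (what is proved, stated in full; the proofs are below) =====
def Claim_equal_initial_rule_based_labeling : Prop := ∀ (sentences : List String) (topic_keywords : List (String × List String)) (min_keywords : Int) (n_per_topic : Int), Dom_initial_rule_based_labeling sentences topic_keywords min_keywords n_per_topic → Pre_initial_rule_based_labeling sentences topic_keywords min_keywords n_per_topic → Spec_initial_rule_based_labeling sentences topic_keywords min_keywords n_per_topic (initial_rule_based_labeling sentences topic_keywords min_keywords n_per_topic)

-- ===== LEMMAS AND PROOFS =====

-- keys of a dict built from an association list are among the list's keys
theorem pv_mem_keys_ofList {l : List (String × List String)} {k : String}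
    (h : k ∈ (PySem.Dict.ofList l).keys) : k ∈ l.map Prod.fst := by
  have : (PySem.Dict.ofList l : PySem.Dict String (List String)).keys
      = PySem.Set.ofList (l.map Prod.fst) := by
    have := PySem.Dict.keys_foldl_insert_key (ν := List String) l Prod.fst (fun _ p => p.2) PySem.Dict.empty
    simpa [PySem.Set.update_nil_left] using this
  rw [this, PySem.Set.mem_ofList] at h; exact h

-- the init loop inserts [] everywhere: every getD with default [] is []
theorem pv_getD_init (l : List (String × List String)) (d : PySem.Dict String (List String))
    (h : ∀ k, d.getD k [] = []) (k : String) :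
    (l.foldl (fun (d : PySem.Dict String (List String)) p => d.insert p.1 []) d).getD k [] = [] := by
  induction l generalizing d with
  | nil => exact h k
  | cons p rest ih =>
      refine ih _ (fun k' => ?_)
      rw [PySem.Dict.getD_insert]
      split <;> simp [h]

-- the inner topic loop: value at k grows by one copy of sent per matching entry keyed k
theorem pv_inner_getD (cond : String × List String → Prop) [DecidablePred cond] (sent : String)
    (l : List (String × List String)) (d : PySem.Dict String (List String)) (m : Bool) (k : String) :
    ((l.foldl (fun (acc : PySem.Dict String (List String) × Bool) p =>
        if cond p then (acc.1.modify p.1 [] (fun t => t ++ [sent]), true) else acc) (d, m)).1).getD k []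
      = d.getD k [] ++ (l.filter (fun p => decide (cond p) && p.1 == k)).map (fun _ => sent) := by
  induction l generalizing d m with
  | nil => simp
  | cons p rest ih =>
      by_cases hc : cond p
      · simp only [List.foldl_cons, if_pos hc, List.filter_cons, decide_eq_true hc, Bool.true_and]
        rw [ih, PySem.Dict.getD_modify]
        by_cases hk : k = p.1
        · simp [hk, List.append_assoc]
        · simp [hk, beq_eq_false_iff_ne.mpr (Ne.symm hk)]
      · simp only [List.foldl_cons, if_neg hc, List.filter_cons, decide_eq_false hc, Bool.false_and]
        rw [ih]
        simp

-- the inner topic loop: the matched flag is an 'any'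
theorem pv_inner_snd (cond : String × List String → Prop) [DecidablePred cond] (sent : String)
    (l : List (String × List String)) (d : PySem.Dict String (List String)) (m : Bool) :
    ((l.foldl (fun (acc : PySem.Dict String (List String) × Bool) p =>
        if cond p then (acc.1.modify p.1 [] (fun t => t ++ [sent]), true) else acc) (d, m)).2)
      = (m || l.any (fun p => decide (cond p))) := by
  induction l generalizing d m with
  | nil => simp
  | cons p rest ih =>
      by_cases hc : cond p
      · simp [hc, ih]
      · simp [hc, ih]

-- the inner topic loop touches only keys already present: keys are unchanged
theorem pv_inner_keys (cond : String × List String → Prop) [DecidablePred cond] (sent : String)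
    (l : List (String × List String)) (d : PySem.Dict String (List String))
    (hl : ∀ p ∈ l, d.contains p.1 = true) (m : Bool) :
    ((l.foldl (fun (acc : PySem.Dict String (List String) × Bool) p =>
        if cond p then (acc.1.modify p.1 [] (fun t => t ++ [sent]), true) else acc) (d, m)).1).keys
      = d.keys := by
  induction l generalizing d m with
  | nil => rfl
  | cons p rest ih =>
      have hp : d.contains p.1 = true := hl p (by simp)
      by_cases hc : cond p
      · simp only [List.foldl_cons, if_pos hc]
        rw [ih _ (fun q hq => by
          rw [PySem.Dict.contains_modify]
          simp [hl q (by simp [hq])])]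
        rw [PySem.Dict.keys_modify, PySem.Dict.keys_insert_of_contains _ _ hp]
      · simp only [List.foldl_cons, if_neg hc]
        exact ih _ (fun q hq => hl q (by simp [hq])) m

-- per-sentence contribution to the list stored at key k
def pvContrib (cond : String → String × List String → Prop) [∀ s p, Decidable (cond s p)]
    (l : List (String × List String)) (k : String) (s : String) : List String :=
  (l.filter (fun p => decide (cond s p) && p.1 == k)).map (fun _ => s) ++
    (if k = "Others" ∧ ¬ (l.any (fun p => decide (cond s p)) = true) then [s] else [])

-- the sentence loop, characterized key by key
theorem pv_outer (cond : String → String × List String → Prop) [∀ s p, Decidable (cond s p)]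
    (l : List (String × List String)) (sents : List String)
    (d : PySem.Dict String (List String))
    (hl : ∀ p ∈ l, d.contains p.1 = true) (hO : d.contains "Others" = true) (k : String) :
    (sents.foldl (fun ts sent =>
        let r := l.foldl (fun (acc : PySem.Dict String (List String) × Bool) p =>
          if cond sent p then (acc.1.modify p.1 [] (fun t => t ++ [sent]), true) else acc) (ts, false)
        if r.2 then r.1 else r.1.modify "Others" [] (fun t => t ++ [sent])) d).getD k []
      = d.getD k [] ++ sents.flatMap (pvContrib cond l k) := by
  induction sents generalizing d with
  | nil => simp
  | cons s rest ih =>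
      simp only [List.foldl_cons, List.flatMap_cons]
      set r := l.foldl (fun (acc : PySem.Dict String (List String) × Bool) p =>
          if cond s p then (acc.1.modify p.1 [] (fun t => t ++ [s]), true) else acc) (d, false) with hr
      have hkeys : r.1.keys = d.keys := pv_inner_keys _ s l d hl false
      have hcont : ∀ k', r.1.contains k' = d.contains k' := by
        intro k'
        rw [PySem.Dict.contains_eq_decide_mem_keys, PySem.Dict.contains_eq_decide_mem_keys, hkeys]
      have hsnd : r.2 = l.any (fun p => decide (cond s p)) := by
        simpa using pv_inner_snd (cond s) s l d false
      have hfst : ∀ k', r.1.getD k' []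
          = d.getD k' [] ++ (l.filter (fun p => decide (cond s p) && p.1 == k')).map (fun _ => s) :=
        fun k' => pv_inner_getD (cond s) s l d false k'
      by_cases hm : r.2 = true
      · rw [if_pos hm]
        rw [ih r.1 (fun p hp => by rw [hcont]; exact hl p hp) (by rw [hcont]; exact hO)]
        rw [hfst k]
        have : pvContrib cond l k s = (l.filter (fun p => decide (cond s p) && p.1 == k)).map (fun _ => s) := by
          unfold pvContrib
          rw [hsnd] at hm
          simp [hm]
        rw [this, List.append_assoc]
      · rw [if_neg hm]
        have hO' : r.1.contains "Others" = true := by rw [hcont]; exact hO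
        rw [ih _ (fun p hp => by
              rw [PySem.Dict.contains_modify]; simp [hcont, hl p hp])
            (by rw [PySem.Dict.contains_modify]; simp)]
        have hget : (r.1.modify "Others" [] (fun t => t ++ [s])).getD k []
            = if k = "Others" then r.1.getD "Others" [] ++ [s] else r.1.getD k [] := by
          rw [PySem.Dict.getD_modify]
        rw [hget]
        have hany : ¬ (l.any (fun p => decide (cond s p)) = true) := by rw [← hsnd]; exact hm
        by_cases hk : k = "Others"
        · subst hk
          rw [hfst "Others"]
          unfold pvContrib
          simp [hany, List.append_assoc]
        · rw [if_neg hk, hfst k]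
          unfold pvContrib
          simp [hk, List.append_assoc]

-- keys survive the sentence loop unchanged
theorem pv_outer_keys (cond : String → String × List String → Prop) [∀ s p, Decidable (cond s p)]
    (l : List (String × List String)) (sents : List String)
    (d : PySem.Dict String (List String))
    (hl : ∀ p ∈ l, d.contains p.1 = true) (hO : d.contains "Others" = true) :
    (sents.foldl (fun ts sent =>
        let r := l.foldl (fun (acc : PySem.Dict String (List String) × Bool) p =>
          if cond sent p then (acc.1.modify p.1 [] (fun t => t ++ [sent]), true) else acc) (ts, false)
        if r.2 then r.1 else r.1.modify "Others" [] (fun t => t ++ [sent])) d).keys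
      = d.keys := by
  induction sents generalizing d with
  | nil => rfl
  | cons s rest ih =>
      simp only [List.foldl_cons]
      set r := l.foldl (fun (acc : PySem.Dict String (List String) × Bool) p =>
          if cond s p then (acc.1.modify p.1 [] (fun t => t ++ [s]), true) else acc) (d, false) with hr
      have hkeys : r.1.keys = d.keys := pv_inner_keys _ s l d hl false
      have hcont : ∀ k', r.1.contains k' = d.contains k' := by
        intro k'
        rw [PySem.Dict.contains_eq_decide_mem_keys, PySem.Dict.contains_eq_decide_mem_keys, hkeys]
      by_cases hm : r.2 = true
      · rw [if_pos hm, ih r.1 (fun p hp => by rw [hcont]; exact hl p hp) (by rw [hcont]; exact hO)]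
        exact hkeys
      · rw [if_neg hm]
        rw [ih _ (fun p hp => by rw [PySem.Dict.contains_modify]; simp [hcont, hl p hp])
            (by rw [PySem.Dict.contains_modify]; simp)]
        rw [PySem.Dict.keys_modify, PySem.Dict.keys_insert_of_contains _ _ (by rw [hcont]; exact hO), hkeys]

-- the truncation loop, characterized key by key
theorem pv_trunc (l : List (String × List String)) (n : Int)
    (hnd : (l.map Prod.fst).Nodup) (d : PySem.Dict String (List String)) (k : String) :
    (l.foldl (fun (ts : PySem.Dict String (List String)) p =>
        ts.insert p.1 (PySem.List.slice (ts.getD p.1 []) none (some n))) d).getD k []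
      = if k ∈ l.map Prod.fst then PySem.List.slice (d.getD k []) none (some n) else d.getD k [] := by
  induction l generalizing d with
  | nil => simp
  | cons p rest ih =>
      have hnd' : (rest.map Prod.fst).Nodup := (List.nodup_cons.mp hnd).2
      have hp : p.1 ∉ rest.map Prod.fst := (List.nodup_cons.mp hnd).1
      simp only [List.foldl_cons]
      rw [ih hnd']
      by_cases hk : k ∈ rest.map Prod.fst
      · have hne : k ≠ p.1 := fun h => hp (h ▸ hk)
        rw [if_pos hk, PySem.Dict.getD_insert, if_neg hne, if_pos (by simp [hk])]
      · rw [if_neg hk, PySem.Dict.getD_insert]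
        by_cases he : k = p.1
        · rw [if_pos he, if_pos (by simp [he]), he]
        · rw [if_neg he, if_neg (by simp [he, hk])]

-- keys survive the truncation loop when every key is already present
theorem pv_trunc_keys (l : List (String × List String)) (n : Int)
    (d : PySem.Dict String (List String)) (hl : ∀ p ∈ l, d.contains p.1 = true) :
    (l.foldl (fun (ts : PySem.Dict String (List String)) p =>
        ts.insert p.1 (PySem.List.slice (ts.getD p.1 []) none (some n))) d).keys
      = d.keys := by
  induction l generalizing d with
  | nil => rfl
  | cons p rest ih =>
      simp only [List.foldl_cons]
      have hp : d.contains p.1 = true := hl p (by simp)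
      rw [ih _ (fun q hq => by
        rw [PySem.Dict.contains_eq_decide_mem_keys, PySem.Dict.keys_insert_of_contains _ _ hp,
          ← PySem.Dict.contains_eq_decide_mem_keys]
        exact hl q (by simp [hq]))]
      exact PySem.Dict.keys_insert_of_contains _ _ hp

-- in a list with distinct keys, filtering for key p.1 finds exactly p (if its test passes)
theorem pv_filter_key (l : List (String × List String)) (hnd : (l.map Prod.fst).Nodup)
    (c : String × List String → Bool) {p : String × List String} (hp : p ∈ l) :
    l.filter (fun q => c q && q.1 == p.1) = if c p then [p] else [] := by
  induction l with
  | nil => cases hp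
  | cons q rest ih =>
      have hnd' : (rest.map Prod.fst).Nodup := (List.nodup_cons.mp hnd).2
      have hq : q.1 ∉ rest.map Prod.fst := (List.nodup_cons.mp hnd).1
      rcases List.mem_cons.mp hp with h | h
      · subst h
        have hrest : rest.filter (fun r => c r && r.1 == p.1) = [] := by
          apply List.filter_eq_nil_iff.mpr
          intro r hr
          have : r.1 ≠ p.1 := fun he => hq (he ▸ List.mem_map_of_mem hr)
          simp [this]
        by_cases hc : c p
        · simp [List.filter_cons, hc, hrest]
        · simp [List.filter_cons, hc, hrest]
      · have hne : q.1 ≠ p.1 := fun he => hq (he ▸ List.mem_map_of_mem h)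
        rw [List.filter_cons]
        simp only [beq_eq_false_iff_ne.mpr hne, Bool.and_false, if_false]
        exact ih hnd' h

-- a flatMap of if-singletons is a filter
theorem pv_flatMap_if {α : Type} (c : α → Bool) (xs : List α) :
    xs.flatMap (fun x => if c x then [x] else []) = xs.filter c := by
  induction xs with
  | nil => rfl
  | cons x rest ih =>
      by_cases hc : c x <;> simp [List.flatMap_cons, hc, ih, List.filter_cons]

-- a comprehension over tagged pairs is a filter over the originals
theorem pv_tag_filter {α β : Type} (tag : α → β) (pred : β → Bool) (xs : List α) :
    ((xs.map (fun x => (x, tag x))).filter (fun q => pred q.2)).map Prod.fst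
      = xs.filter (fun x => pred (tag x)) := by
  induction xs with
  | nil => rfl
  | cons x rest ih => by_cases h : pred (tag x) <;> simp [h, ih]

-- ===== VERDICT (by name: the statement is the Claim_ definition above) =====
set_option maxHeartbeats 1000000 in
theorem initial_rule_based_labeling_spec : Claim_equal_initial_rule_based_labeling := by
  intro sentences topic_keywords min_keywords n_per_topic _ hpre
  unfold Spec_initial_rule_based_labeling
  unfold initial_rule_based_labeling initial_rule_based_labeling_alt
  show ((PySem.Dict.ofList topic_keywords).items.foldl (fun (ts : PySem.Dict String (List String)) p =>
      ts.insert p.1 (PySem.List.slice (ts.getD p.1 []) none (some n_per_topic)))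
      (sentences.foldl (fun ts sent =>
        let words := PySem.Set.ofList (PySem.Str.split₀ (PySem.Str.lower sent))
        let r := (PySem.Dict.ofList topic_keywords).items.foldl (fun (acc : PySem.Dict String (List String) × Bool) p =>
          if min_keywords ≤ PySem.Set.len (PySem.Set.inter words (PySem.Set.ofList p.2)) then
            (acc.1.modify p.1 [] (fun l => l ++ [sent]), true)
          else acc) (ts, false)
        if r.2 then r.1 else r.1.modify "Others" [] (fun l => l ++ [sent]))
        (((PySem.Dict.ofList topic_keywords).items.foldl (fun (d : PySem.Dict String (List String)) p => d.insert p.1 []) PySem.Dict.empty).insert "Others" []))).items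
    = (((PySem.Dict.ofList topic_keywords).items.foldl (fun (d : PySem.Dict String (List String)) p =>
        d.insert p.1 (PySem.List.slice (((sentences.map (fun s => (s, PySem.Set.ofList (PySem.Str.split₀ (PySem.Str.lower s))))).filter (fun q =>
            decide (min_keywords ≤ PySem.Set.len (PySem.Set.inter q.2 (PySem.Set.ofList p.2))))).map Prod.fst) none (some n_per_topic))) PySem.Dict.empty).insert
        "Others" (((sentences.map (fun s => (s, PySem.Set.ofList (PySem.Str.split₀ (PySem.Str.lower s))))).filter (fun q =>
          (PySem.Dict.ofList topic_keywords).items.all (fun p =>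
            decide (PySem.Set.len (PySem.Set.inter q.2 (PySem.Set.ofList p.2)) < min_keywords)))).map Prod.fst)).items
  set tk := (PySem.Dict.ofList topic_keywords).items with htk
  set cond : String → (String × List String) → Prop := fun s p =>
    min_keywords ≤ PySem.Set.len (PySem.Set.inter (PySem.Set.ofList (PySem.Str.split₀ (PySem.Str.lower s))) (PySem.Set.ofList p.2)) with hcond
  -- basic key facts
  have hKnd : (tk.map Prod.fst).Nodup := by
    rw [htk]
    have h := PySem.Dict.nodup_keys_ofList (ν := List String) topic_keywords
    simpa [PySem.Dict.keys] using h
  have hOK : "Others" ∉ tk.map Prod.fst := by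
    rw [htk]
    intro h
    have h2 : "Others" ∈ topic_keywords.map Prod.fst :=
      pv_mem_keys_ofList (by simpa [PySem.Dict.keys] using h)
    rcases List.mem_map.mp h2 with ⟨p, hp, hfst⟩
    exact hpre p hp hfst
  -- the B side: the dict comprehension plus the fresh "Others" key is an append
  have hBres : (tk.foldl (fun (d : PySem.Dict String (List String)) p =>
      d.insert p.1 (PySem.List.slice (((sentences.map (fun s => (s, PySem.Set.ofList (PySem.Str.split₀ (PySem.Str.lower s))))).filter (fun q =>
          decide (min_keywords ≤ PySem.Set.len (PySem.Set.inter q.2 (PySem.Set.ofList p.2))))).map Prod.fst) none (some n_per_topic))) PySem.Dict.empty).items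
      = tk.map (fun p =>
        (p.1, PySem.List.slice (((sentences.map (fun s => (s, PySem.Set.ofList (PySem.Str.split₀ (PySem.Str.lower s))))).filter (fun q =>
            decide (min_keywords ≤ PySem.Set.len (PySem.Set.inter q.2 (PySem.Set.ofList p.2))))).map Prod.fst) none (some n_per_topic))) := by
    have h := PySem.Dict.items_foldl_insert_fresh (l := tk) (k := Prod.fst)
      (v := fun p => PySem.List.slice (((sentences.map (fun s => (s, PySem.Set.ofList (PySem.Str.split₀ (PySem.Str.lower s))))).filter (fun q =>
          decide (min_keywords ≤ PySem.Set.len (PySem.Set.inter q.2 (PySem.Set.ofList p.2))))).map Prod.fst) none (some n_per_topic))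
      (d := PySem.Dict.empty) (by simp) hKnd
    simpa using h
  have hBc : (tk.foldl (fun (d : PySem.Dict String (List String)) p =>
      d.insert p.1 (PySem.List.slice (((sentences.map (fun s => (s, PySem.Set.ofList (PySem.Str.split₀ (PySem.Str.lower s))))).filter (fun q =>
          decide (min_keywords ≤ PySem.Set.len (PySem.Set.inter q.2 (PySem.Set.ofList p.2))))).map Prod.fst) none (some n_per_topic))) PySem.Dict.empty).contains "Others" = false := by
    rw [PySem.Dict.contains_eq_decide_mem_keys]
    simp only [PySem.Dict.keys, hBres, List.map_map]
    simpa using hOK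
  rw [PySem.Dict.items_insert_of_not_contains _ _ hBc, hBres]
  -- the initial dict
  set ts1 := (tk.foldl (fun (d : PySem.Dict String (List String)) p => d.insert p.1 []) PySem.Dict.empty).insert "Others" [] with hts1
  have hitems0 : (tk.foldl (fun (d : PySem.Dict String (List String)) p => d.insert p.1 []) PySem.Dict.empty).items
      = tk.map (fun p => (p.1, ([] : List String))) := by
    have h := PySem.Dict.items_foldl_insert_fresh (l := tk) (k := Prod.fst) (v := fun _ => ([] : List String))
      (d := PySem.Dict.empty) (by simp) hKnd
    simpa using h
  have hkeys0 : (tk.foldl (fun (d : PySem.Dict String (List String)) p => d.insert p.1 []) PySem.Dict.empty).keys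
      = tk.map Prod.fst := by
    simp [PySem.Dict.keys, hitems0]
  have hc0 : (tk.foldl (fun (d : PySem.Dict String (List String)) p => d.insert p.1 []) PySem.Dict.empty).contains "Others" = false := by
    rw [PySem.Dict.contains_eq_decide_mem_keys, hkeys0]
    simp [hOK]
  have hkeys1 : ts1.keys = tk.map Prod.fst ++ ["Others"] := by
    rw [hts1, PySem.Dict.keys_insert_of_not_contains _ _ hc0, hkeys0]
  have hget1 : ∀ k, ts1.getD k [] = [] := by
    intro k
    rw [hts1, PySem.Dict.getD_insert]
    split
    · rfl
    · exact pv_getD_init tk PySem.Dict.empty (by simp) k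
  have hc1top : ∀ p ∈ tk, ts1.contains p.1 = true := by
    intro p hp
    rw [PySem.Dict.contains_eq_decide_mem_keys, hkeys1]
    simp [List.mem_map_of_mem (f := Prod.fst) hp]
  have hc1O : ts1.contains "Others" = true := by
    rw [PySem.Dict.contains_eq_decide_mem_keys, hkeys1]
    simp
  -- the sentence loop
  set ts2 := sentences.foldl (fun ts sent =>
        let words := PySem.Set.ofList (PySem.Str.split₀ (PySem.Str.lower sent))
        let r := tk.foldl (fun (acc : PySem.Dict String (List String) × Bool) p =>
          if min_keywords ≤ PySem.Set.len (PySem.Set.inter words (PySem.Set.ofList p.2)) then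
            (acc.1.modify p.1 [] (fun l => l ++ [sent]), true)
          else acc) (ts, false)
        if r.2 then r.1 else r.1.modify "Others" [] (fun l => l ++ [sent])) ts1 with hts2
  have hkeys2 : ts2.keys = tk.map Prod.fst ++ ["Others"] := by
    rw [hts2]
    exact (pv_outer_keys cond tk sentences ts1 hc1top hc1O).trans hkeys1
  have hc2top : ∀ p ∈ tk, ts2.contains p.1 = true := by
    intro p hp
    rw [PySem.Dict.contains_eq_decide_mem_keys, hkeys2]
    simp [List.mem_map_of_mem (f := Prod.fst) hp]
  have hget2 : ∀ k, ts2.getD k [] = sentences.flatMap (pvContrib cond tk k) := by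
    intro k
    rw [hts2]
    have h := pv_outer cond tk sentences ts1 hc1top hc1O k
    rw [hget1 k, List.nil_append] at h
    exact h
  -- the truncation loop
  set ts3 := tk.foldl (fun (ts : PySem.Dict String (List String)) p =>
      ts.insert p.1 (PySem.List.slice (ts.getD p.1 []) none (some n_per_topic))) ts2 with hts3
  have hkeys3 : ts3.keys = tk.map Prod.fst ++ ["Others"] := by
    rw [hts3, pv_trunc_keys tk n_per_topic ts2 hc2top]
    exact hkeys2
  have hnd3 : ts3.keys.Nodup := by
    rw [hkeys3]
    refine List.Nodup.append hKnd (by simp) ?_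
    intro a ha hb
    simp only [List.mem_singleton] at hb
    exact hOK (hb ▸ ha)
  have hget3 : ∀ k, ts3.getD k [] = if k ∈ tk.map Prod.fst
      then PySem.List.slice (ts2.getD k []) none (some n_per_topic) else ts2.getD k [] := by
    intro k
    rw [hts3]
    exact pv_trunc tk n_per_topic hKnd ts2 k
  -- assemble
  rw [PySem.Dict.items_eq_map_keys ts3 hnd3 ([] : List String), hkeys3, List.map_append]
  congr 1
  · -- the per-topic lists
    rw [List.map_map]
    apply List.map_congr_left
    intro p hp
    have hne : p.1 ≠ "Others" := fun h => hOK (h ▸ List.mem_map_of_mem (f := Prod.fst) hp)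
    simp only [Function.comp_apply, Prod.mk.injEq, true_and]
    -- left side: the accumulated list at key p.1, truncated
    rw [hget3 p.1, if_pos (List.mem_map_of_mem (f := Prod.fst) hp), hget2 p.1]
    -- its sentence-loop contribution is a filter
    have hcon : ∀ s, pvContrib cond tk p.1 s = if decide (cond s p) = true then [s] else [] := by
      intro s
      unfold pvContrib
      rw [pv_filter_key tk hKnd (fun q => decide (cond s q)) hp]
      have hnotO : ¬ (p.1 = "Others" ∧ ¬ (tk.any (fun q => decide (cond s q)) = true)) :=
        fun h => hne h.1
      rw [if_neg hnotO]
      by_cases hc : decide (cond s p) = true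
      · simp [hc]
      · simp [hc]
    rw [funext hcon, pv_flatMap_if,
      pv_tag_filter (fun s => PySem.Set.ofList (PySem.Str.split₀ (PySem.Str.lower s)))
        (fun ws => decide (min_keywords ≤ PySem.Set.len (PySem.Set.inter ws (PySem.Set.ofList p.2)))) sentences]
  · -- the "Others" list
    simp only [List.map_cons, List.map_nil, Prod.mk.injEq, List.cons.injEq, and_true, true_and]
    rw [hget3 "Others", if_neg hOK, hget2 "Others"]
    have hcon : ∀ s, pvContrib cond tk "Others" s
        = if (tk.all (fun p => decide (PySem.Set.len (PySem.Set.inter (PySem.Set.ofList (PySem.Str.split₀ (PySem.Str.lower s))) (PySem.Set.ofList p.2)) < min_keywords))) = true then [s] else [] := by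
      intro s
      unfold pvContrib
      have hfil : tk.filter (fun q => decide (cond s q) && q.1 == "Others") = [] := by
        apply List.filter_eq_nil_iff.mpr
        intro q hq
        have : q.1 ≠ "Others" := fun h => hOK (h ▸ List.mem_map_of_mem (f := Prod.fst) hq)
        simp [this]
      rw [hfil]
      simp only [List.map_nil, List.nil_append]
      have hiff : (True ∧ ¬ (tk.any (fun p => decide (cond s p)) = true))
          ↔ (tk.all (fun p => decide (PySem.Set.len (PySem.Set.inter (PySem.Set.ofList (PySem.Str.split₀ (PySem.Str.lower s))) (PySem.Set.ofList p.2)) < min_keywords)) = true) := by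
        constructor
        · rintro ⟨-, hna⟩
          rw [List.all_eq_true]
          intro p hp
          rw [decide_eq_true_eq]
          by_contra hlt
          exact hna (List.any_eq_true.mpr ⟨p, hp, decide_eq_true (Int.not_lt.mp hlt)⟩)
        · intro hall
          refine ⟨trivial, fun hany => ?_⟩
          rcases List.any_eq_true.mp hany with ⟨p, hp, hd⟩
          have h1 : PySem.Set.len (PySem.Set.inter (PySem.Set.ofList (PySem.Str.split₀ (PySem.Str.lower s))) (PySem.Set.ofList p.2)) < min_keywords :=
            decide_eq_true_eq.mp (List.all_eq_true.mp hall p hp)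
          have h2 : min_keywords ≤ PySem.Set.len (PySem.Set.inter (PySem.Set.ofList (PySem.Str.split₀ (PySem.Str.lower s))) (PySem.Set.ofList p.2)) :=
            decide_eq_true_eq.mp hd
          exact absurd h2 (Int.not_le.mpr h1)
      exact if_congr hiff rfl rfl
    rw [funext hcon, pv_flatMap_if,
      pv_tag_filter (fun s => PySem.Set.ofList (PySem.Str.split₀ (PySem.Str.lower s)))
        (fun ws => tk.all (fun p => decide (PySem.Set.len (PySem.Set.inter ws (PySem.Set.ofList p.2)) < min_keywords))) sentences]
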